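-- pv_equiv track=rewrite | github.com/Aasthaengg/IBMdataset | Python_codes/p03495/s792372419.py | solve
-- ===== SOURCE A (Python) =====
-- import collections
--
-- def solve(n, k, a_list):
--
--     counter = collections.Counter()
--
--     for i in a_list:
--         counter[i] += 1
--
--     key_num = len(counter.keys())
--     if key_num > k:
--         tmp = sorted(counter.items(), key=lambda x: x[1])
--         ans = sum([v for k, v in tmp[: key_num - k]])
--     else:
--         ans = 0
--
--     return ans
-- ===== SOURCE B (Python) =====
-- def solve(n, k, a_list):
--     counts = {}
--     for x in a_list:
--         counts[x] = counts.get(x, 0) + 1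
--     need = len(counts) - k
--     if need <= 0:
--         return 0
--     bucket = {}
--     for c in counts.values():
--         bucket[c] = bucket.get(c, 0) + 1
--     ans = 0
--     for f in range(1, len(a_list) + 1):
--         c = bucket.get(f, 0)
--         t = c if c < need else need
--         ans += t * f
--         need -= t
--     return ans
-- ===== Notes on version B (the rewrite author's own statement) =====
-- stated objective: alternative
-- what changed: Replaces the comparison sort of (key, count) items and the slice-then-sum with a counting-sort style pass: a frequency-of-frequencies bucket table is built once and frequencies 1..n are swept in increasing order, greedily taking the smallest (distinct-k) counts; no sort and no item list.
import Mathlib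
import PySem

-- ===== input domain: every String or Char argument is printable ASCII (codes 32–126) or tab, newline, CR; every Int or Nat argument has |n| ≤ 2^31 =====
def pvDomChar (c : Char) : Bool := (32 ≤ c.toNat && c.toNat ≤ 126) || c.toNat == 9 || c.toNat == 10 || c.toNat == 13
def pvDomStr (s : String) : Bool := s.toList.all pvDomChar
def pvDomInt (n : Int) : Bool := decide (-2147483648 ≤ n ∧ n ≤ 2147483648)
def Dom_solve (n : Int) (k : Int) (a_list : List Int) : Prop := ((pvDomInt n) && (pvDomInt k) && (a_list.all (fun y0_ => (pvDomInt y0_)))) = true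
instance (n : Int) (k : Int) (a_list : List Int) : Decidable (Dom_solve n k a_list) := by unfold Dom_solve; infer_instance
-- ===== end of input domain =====

-- B replaces A's comparison sort of (key, count) items + slice-and-sum by a counting-sort style
-- frequency-of-frequencies bucket sweep (objective: alternative algorithm of similar cost).

-- ===== PORT A =====
def solve (n : Int) (k : Int) (a_list : List Int) : Int :=
  let counter := a_list.foldl (fun d i => d.modify i 0 (· + 1)) (PySem.Dict.empty : PySem.Dict Int Int)
  let key_num : Int := (counter.keys.length : Int)
  if key_num > k then
    let tmp := PySem.List.sorted counter.items (fun x => x.2)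
    ((PySem.List.slice tmp none (some (key_num - k))).map (fun p => p.2)).sum
  else
    0

-- ===== PORT B =====
def solve_alt (n : Int) (k : Int) (a_list : List Int) : Int :=
  let counts := a_list.foldl (fun d x => d.insert x (d.getD x 0 + 1)) (PySem.Dict.empty : PySem.Dict Int Int)
  let need : Int := (counts.size : Int) - k
  if need ≤ 0 then 0
  else
    let bucket := counts.values.foldl (fun d c => d.insert c (d.getD c 0 + 1)) (PySem.Dict.empty : PySem.Dict Int Int)
    ((PySem.List.pyRange 1 ((a_list.length : Int) + 1)).foldl
      (fun (st : Int × Int) f =>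
        let c := bucket.getD f 0
        let t := if c < st.2 then c else st.2
        (st.1 + t * f, st.2 - t)) (0, need)).1

-- ===== PRECONDITION & SPEC =====
def Spec_solve (n : Int) (k : Int) (a_list : List Int) (out : Int) : Prop := out = solve_alt n k a_list
instance (n : Int) (k : Int) (a_list : List Int) (out : Int) : Decidable (Spec_solve n k a_list out) := by unfold Spec_solve; infer_instance

-- ===== CLAIM (what is proved, stated in full; the proofs are below) =====
def Claim_equal_solve : Prop := ∀ (n : Int) (k : Int) (a_list : List Int), Dom_solve n k a_list → Spec_solve n k a_list (solve n k a_list)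

-- ===== LEMMAS AND PROOFS =====

-- a sorted list bounded below by lo splits into the block of lo's and a sorted tail strictly above lo
lemma sorted_split (s : List Int) (lo : Int) (hs : s.Pairwise (· ≤ ·)) (hlo : ∀ x ∈ s, lo ≤ x) :
    ∃ t, s = List.replicate (s.count lo) lo ++ t ∧ t.Pairwise (· ≤ ·) ∧ ∀ x ∈ t, lo + 1 ≤ x := by
  induction s with
  | nil => exact ⟨[], by simp, by simp, by simp⟩
  | cons a rest ih =>
    rcases eq_or_ne a lo with rfl | hne
    · obtain ⟨t, h1, h2, h3⟩ := ih (List.pairwise_cons.mp hs).2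
        (fun x hx => hlo x (List.mem_cons_of_mem _ hx))
      refine ⟨t, ?_, h2, h3⟩
      rw [List.count_cons_self, List.replicate_succ, List.cons_append]
      exact congrArg (List.cons a) h1
    · have ha : lo < a := lt_of_le_of_ne (hlo a (by simp)) (Ne.symm hne)
      have hall : ∀ x ∈ a :: rest, lo + 1 ≤ x := by
        intro x hx
        rcases List.mem_cons.mp hx with rfl | hx'
        · omega
        · have := (List.pairwise_cons.mp hs).1 x hx'; omega
      have hcount : (a :: rest).count lo = 0 := by
        rw [List.count_eq_zero]
        intro hmem; have := hall lo hmem; omega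
      exact ⟨a :: rest, by simp [hcount], hs, hall⟩

-- the bucket sweep over [lo, hi) computes the sum of the smallest `need` elements of any
-- sorted list s whose elements lie in [lo, hi), when g reports multiplicities of s
lemma bucket_fold (N : Nat) : ∀ (lo hi : Int) (g : Int → Int) (s : List Int) (acc need : Int),
    (hi - lo).toNat = N →
    (∀ f, lo ≤ f → f < hi → g f = (s.count f : Int)) →
    s.Pairwise (· ≤ ·) → (∀ x ∈ s, lo ≤ x) → (∀ x ∈ s, x < hi) → 0 ≤ need →
    ((PySem.List.pyRange lo hi).foldl
      (fun (st : Int × Int) f =>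
        (st.1 + (if g f < st.2 then g f else st.2) * f,
         st.2 - (if g f < st.2 then g f else st.2))) (acc, need)).1
      = acc + (s.take need.toNat).sum := by
  induction N with
  | zero =>
    intro lo hi g s acc need hN hg hs hlo hhi hneed
    have hle : hi ≤ lo := by omega
    rw [PySem.List.pyRange_one_eq_nil hle]
    have hs0 : s = [] := by
      cases s with
      | nil => rfl
      | cons a t =>
        have h1 := hhi a (by simp)
        have h2 := hlo a (by simp)
        omega
    simp [hs0]
  | succ N ih =>
    intro lo hi g s acc need hN hg hs hlo hhi hneed
    have hlt : lo < hi := by omega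
    obtain ⟨t, hsplit, hts, htlo⟩ := sorted_split s lo hs hlo
    rw [PySem.List.pyRange_one_cons hlt, List.foldl_cons]
    have hgc : g lo = (s.count lo : Int) := hg lo le_rfl hlt
    set cN : Nat := s.count lo with hcN
    set t0 : Int := if g lo < need then g lo else need with ht0
    have ht0n : 0 ≤ t0 ∧ t0 ≤ need := by rw [ht0, hgc]; split <;> omega
    have hcount_t : ∀ f, lo + 1 ≤ f → f < hi → g f = (t.count f : Int) := by
      intro f h1 h2
      have : s.count f = t.count f := by
        rw [hsplit, List.count_append, List.count_replicate]
        have : ¬ (lo = f) := by omega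
        simp [this]
      rw [hg f (by omega) h2, this]
    have hthi : ∀ x ∈ t, x < hi := by
      intro x hx
      exact hhi x (by rw [hsplit]; exact List.mem_append_right _ hx)
    rw [ih (lo + 1) hi g t (acc + t0 * lo) (need - t0) (by omega) hcount_t hts htlo hthi (by omega)]
    -- now pure arithmetic on the split of s
    have harith1 : (need - t0).toNat = need.toNat - cN := by
      rw [ht0, hgc]; split <;> omega
    have harith2 : t0 = ((min need.toNat cN : Nat) : Int) := by
      rw [ht0, hgc]; split <;> omega
    rw [harith1, hsplit, List.take_append, List.take_replicate,
        List.length_replicate, List.sum_append, List.sum_replicate, nsmul_eq_mul]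
    rw [← harith2]
    ring

-- sorting projections: the counts of the value-sorted items are the sorted counts
lemma map_snd_sorted (xs : List (Int × Int)) :
    (PySem.List.sorted xs (fun x => x.2)).map (fun x => x.2)
      = PySem.List.sorted (xs.map (fun x => x.2)) (fun x => x) := by
  refine List.Perm.eq_of_pairwise (fun a b _ _ h1 h2 => le_antisymm h1 h2) ?_ ?_ ?_
  · exact PySem.List.sorted_map_key_pairwise xs (fun x => x.2)
  · exact PySem.List.sorted_pairwise (xs.map (fun x => x.2)) (fun x => x)
  · exact ((PySem.List.sorted_perm xs (fun x => x.2) false).map _).trans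
      ((PySem.List.sorted_perm (xs.map (fun x => x.2)) (fun x => x) false).symm)

-- ===== VERDICT (by name: the statement is the Claim_ definition above) =====
theorem solve_spec : Claim_equal_solve := by
  intro n k a_list _
  unfold Spec_solve solve solve_alt
  simp only [PySem.Dict.foldl_insert_getD_add_one_eq_counter, ← PySem.Dict.counter_eq_foldl]
  -- shared notation
  set ks := PySem.Set.ofList a_list with hks
  have hitems : (PySem.Dict.counter a_list).items
      = ks.map (fun v => (v, (a_list.count v : Int))) := PySem.Dict.items_counter a_list
  set cnts : List Int := ks.map (fun v => (a_list.count v : Int)) with hcnts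
  have hkeylen : ((PySem.Dict.counter a_list).keys.length : Int) = (ks.length : Int) := by
    simp [PySem.Dict.keys, hitems]
  have hsize : ((PySem.Dict.counter a_list).size : Int) = (ks.length : Int) := by
    simp [PySem.Dict.size, hitems]
  have hvalues : (PySem.Dict.counter a_list).values = cnts := by
    simp [PySem.Dict.values, hitems, hcnts, List.map_map, Function.comp]
  set m : Int := (ks.length : Int) with hm
  rw [hkeylen, hsize, hvalues]
  by_cases hmk : m - k ≤ 0
  · have : ¬ (m > k) := by omega
    simp [this, hmk]
  · have hgt : m > k := by omega
    simp only [if_pos hgt, if_neg hmk]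
    -- A side: reduce to sum of take of sorted counts
    have hpos : m - k = (((m - k).toNat : Nat) : Int) := by omega
    rw [hpos, PySem.List.slice_to_natCast, List.map_take, map_snd_sorted, hitems,
        List.map_map]
    have hcomp : ((fun x : Int × Int => x.2) ∘ fun v => (v, (a_list.count v : Int)))
        = fun v => (a_list.count v : Int) := rfl
    rw [hcomp, ← hcnts]
    -- B side: the bucket sweep
    set sc := PySem.List.sorted cnts (fun x => x) with hsc
    have hperm : sc.Perm cnts := PySem.List.sorted_perm cnts (fun x => x) false
    have hmem_bounds : ∀ x ∈ cnts, 1 ≤ x ∧ x ≤ (a_list.length : Int) := by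
      intro x hx
      rw [hcnts] at hx
      obtain ⟨v, hv, rfl⟩ := List.mem_map.mp hx
      have hvmem : v ∈ a_list := (PySem.Set.mem_ofList _ _).mp hv
      constructor
      · exact_mod_cast Nat.one_le_iff_ne_zero.mpr (by simpa [List.count_eq_zero] using
          (List.count_pos_iff.mpr hvmem).ne')
      · exact_mod_cast List.count_le_length
    have := bucket_fold ((a_list.length : Int) + 1 - 1).toNat 1 ((a_list.length : Int) + 1)
      (fun f => (PySem.Dict.counter cnts).getD f 0) sc 0 ((m - k).toNat : Int) rfl
      (by
        intro f _ _
        simp only []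
        rw [PySem.Dict.getD_counter, hperm.count_eq])
      (PySem.List.sorted_pairwise cnts (fun x => x))
      (by intro x hx; exact (hmem_bounds x ((PySem.List.mem_sorted _ _ _ _).mp hx)).1)
      (by intro x hx; have := (hmem_bounds x ((PySem.List.mem_sorted _ _ _ _).mp hx)).2; omega)
      (by omega)
    beta_reduce at this
    rw [Int.toNat_natCast] at this
    rw [this, zero_add]
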